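-- pv_equiv track=rewrite | github.com/KingInYellow18/medianest | tests/test_dockerfile_backend.py | _extract_backend_section
-- ===== SOURCE A (Python) =====
-- def _extract_backend_section(compose_content):
--     """Helper method to extract backend service section from docker-compose.yml"""
--     lines = compose_content.split('\n')
--     backend_section = []
--     in_backend = False
--
--     for line in lines:
--         if line.strip().startswith('backend:'):
--             in_backend = True
--             backend_section.append(line)
--         elif in_backend:
--             if line.startswith('  ') or line.strip() == '':
--                 backend_section.append(line)
--             else:
--                 break
--
--     return '\n'.join(backend_section)
-- ===== SOURCE B (Python) =====
-- def _extract_backend_section(compose_content):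
--     """Extract the backend service section by a single REVERSE traversal (a right
--     fold): for each suffix of the lines we maintain `section` (the answer for that
--     suffix) and `run` (the longest prefix of continuation lines of that suffix)."""
--     lines = compose_content.split('\n')
--     section = []  # answer for the suffix of lines processed so far
--     run = []      # longest keep-prefix (backend:/indented/blank lines) of that suffix
--     for line in reversed(lines):
--         stripped = line.strip()
--         if stripped.startswith('backend:'):
--             section = [line] + run
--         if stripped.startswith('backend:') or line.startswith('  ') or stripped == '':
--             run = [line] + run
--         else:
--             run = []
--     return '\n'.join(section)
-- ===== Notes on version B (the rewrite author's own statement) =====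
-- stated objective: alternative
-- what changed: Replaces A's forward stateful scan (in_backend flag, accumulator, break) by a single reverse traversal (a right fold) that maintains, for each suffix, the answer for that suffix and its longest run of continuation lines, building the output back-to-front.
import Mathlib
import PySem

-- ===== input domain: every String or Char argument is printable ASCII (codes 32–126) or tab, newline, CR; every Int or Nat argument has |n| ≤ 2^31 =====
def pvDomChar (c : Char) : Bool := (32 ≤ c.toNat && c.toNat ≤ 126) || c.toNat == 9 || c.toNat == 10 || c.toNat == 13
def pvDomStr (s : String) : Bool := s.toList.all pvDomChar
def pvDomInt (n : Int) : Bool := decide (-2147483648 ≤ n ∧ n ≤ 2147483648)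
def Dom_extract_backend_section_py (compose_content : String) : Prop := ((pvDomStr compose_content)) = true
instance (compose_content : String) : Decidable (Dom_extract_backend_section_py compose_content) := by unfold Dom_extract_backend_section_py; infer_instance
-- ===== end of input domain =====

-- B replaces A's forward stateful scan (in_backend flag + break) by a single reverse
-- traversal (right fold) maintaining each suffix's answer and its run of continuation
-- lines; alternative decomposition, same linear number of line visits.

-- ===== PORT A =====
-- the for-loop of A: state = (accumulated section, in_backend); 'break' returns acc
def azLoop (lines : List String) (acc : List String) (inb : Bool) : List String :=
  match lines with
  | [] => acc
  | l :: rest =>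
    if PySem.Str.startswith (PySem.Str.strip l) "backend:" then
      azLoop rest (acc ++ [l]) true
    else if inb then
      if PySem.Str.startswith l "  " || PySem.Str.strip l == "" then
        azLoop rest (acc ++ [l]) inb
      else acc
    else azLoop rest acc inb

def extract_backend_section_py (compose_content : String) : String :=
  PySem.Str.join "\n" (azLoop ((PySem.Str.split? compose_content "\n").getD []) [] false)

-- ===== PORT B =====
-- one step of Source B's reversed loop; state = (section, run), both over the suffix seen
def bzStep (l : String) (st : List String × List String) : List String × List String :=
  let stripped := PySem.Str.strip l
  let sec := if PySem.Str.startswith stripped "backend:" then l :: st.2 else st.1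
  let run :=
    if PySem.Str.startswith stripped "backend:" || PySem.Str.startswith l "  " || stripped == "" then
      l :: st.2
    else []
  (sec, run)

def extract_backend_section_py_alt (compose_content : String) : String :=
  let lines := (PySem.Str.split? compose_content "\n").getD []
  PySem.Str.join "\n" (lines.foldr bzStep ([], [])).1

-- ===== PRECONDITION & SPEC =====
def Spec_extract_backend_section_py (compose_content : String) (out : String) : Prop := out = extract_backend_section_py_alt compose_content
instance (compose_content : String) (out : String) : Decidable (Spec_extract_backend_section_py compose_content out) := by unfold Spec_extract_backend_section_py; infer_instance

-- ===== CLAIM (what is proved, stated in full; the proofs are below) =====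
def Claim_equal_extract_backend_section_py : Prop := ∀ (compose_content : String), Dom_extract_backend_section_py compose_content → Spec_extract_backend_section_py compose_content (extract_backend_section_py compose_content)

-- ===== LEMMAS AND PROOFS =====

def bzIsStart (l : String) : Bool := PySem.Str.startswith (PySem.Str.strip l) "backend:"

def bzKeeps (l : String) : Bool :=
  bzIsStart l || PySem.Str.startswith l "  " || PySem.Str.strip l == ""

-- the canonical description both programs compute
def bzSec (ls : List String) : List String :=
  match ls.findIdx? (fun l => bzIsStart l) with
  | none => []
  | some s => (ls.drop s).takeWhile bzKeeps

-- A's loop with in_backend = true takes lines while bzKeeps holds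
theorem azLoop_true (ls : List String) : ∀ acc, azLoop ls acc true = acc ++ ls.takeWhile bzKeeps := by
  induction ls with
  | nil => intro acc; simp [azLoop]
  | cons l rest ih =>
    intro acc
    cases h1 : PySem.Str.startswith (PySem.Str.strip l) "backend:" <;>
      cases h2 : PySem.Str.startswith l "  " <;>
      cases h3 : (PySem.Str.strip l == "") <;>
      simp only [azLoop, bzKeeps, bzIsStart, h1, h2, h3, List.takeWhile_cons] <;>
      simp [ih]

-- A's loop with in_backend = false computes bzSec
theorem azLoop_false (ls : List String) : ∀ acc, azLoop ls acc false = acc ++ bzSec ls := by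
  induction ls with
  | nil => intro acc; simp [azLoop, bzSec]
  | cons l rest ih =>
    intro acc
    cases h1 : PySem.Str.startswith (PySem.Str.strip l) "backend:"
    · have hstep : azLoop (l :: rest) acc false = azLoop rest acc false := by
        simp only [azLoop, h1, Bool.false_eq_true, if_false]
      rw [hstep, ih]
      have h1' : bzIsStart l = false := h1
      simp only [bzSec, List.findIdx?_cons, h1', Bool.false_eq_true, if_false]
      cases h : rest.findIdx? (fun l => bzIsStart l) <;>
        simp [List.drop_succ_cons]
    · have hstep : azLoop (l :: rest) acc false = azLoop rest (acc ++ [l]) true := by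
        simp only [azLoop, h1, if_true]
      rw [hstep, azLoop_true]
      have h1' : bzIsStart l = true := h1
      have hk : bzKeeps l = true := by
        simp only [bzKeeps, h1', Bool.true_or]
      simp only [bzSec, List.findIdx?_cons, h1', if_true, List.drop_zero,
        List.takeWhile_cons, hk]
      simp

-- B's right fold computes (bzSec, takeWhile bzKeeps) of the suffix
theorem foldr_bzStep (ls : List String) :
    ls.foldr bzStep ([], []) = (bzSec ls, ls.takeWhile bzKeeps) := by
  induction ls with
  | nil => simp [bzSec]
  | cons l rest ih =>
    rw [List.foldr_cons, ih]
    cases h1 : bzIsStart l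
    · have h1' : PySem.Str.startswith (PySem.Str.strip l) "backend:" = false := h1
      have hsec : bzSec (l :: rest) = bzSec rest := by
        simp only [bzSec, List.findIdx?_cons, h1, Bool.false_eq_true, if_false]
        cases h : rest.findIdx? (fun l => bzIsStart l) <;> simp [List.drop_succ_cons]
      cases hk : bzKeeps l
      · have h2 : (PySem.Str.startswith l "  " || PySem.Str.strip l == "") = false := by
          have := hk
          simp only [bzKeeps, bzIsStart, h1', Bool.false_or] at this
          exact this
        simp only [bzStep, h1', Bool.false_or, h2, Bool.false_eq_true, if_false,
          List.takeWhile_cons, hk, hsec]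
      · have h2 : (PySem.Str.startswith l "  " || PySem.Str.strip l == "") = true := by
          have := hk
          simp only [bzKeeps, bzIsStart, h1', Bool.false_or] at this
          exact this
        simp only [bzStep, h1', Bool.false_or, h2, Bool.false_eq_true, if_false, if_true,
          List.takeWhile_cons, hk, hsec]
    · have h1' : PySem.Str.startswith (PySem.Str.strip l) "backend:" = true := h1
      have hk : bzKeeps l = true := by simp [bzKeeps, h1]
      have hsec : bzSec (l :: rest) = l :: rest.takeWhile bzKeeps := by
        simp [bzSec, List.findIdx?_cons, h1, hk]
      simp only [bzStep, h1', Bool.true_or, if_true, List.takeWhile_cons, hk, hsec]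

-- ===== VERDICT (by name: the statement is the Claim_ definition above) =====
theorem extract_backend_section_py_spec : Claim_equal_extract_backend_section_py := by
  intro c _
  unfold Spec_extract_backend_section_py extract_backend_section_py extract_backend_section_py_alt
  rw [azLoop_false]
  simp only [foldr_bzStep]
  simp
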